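-- pv_equiv track=rewrite | github.com/6410110723/Testcase-6410110723 | Funny/FunnyString.py | Funny
-- ===== SOURCE A (Python) =====
-- def Funny(s):
--     if len(s) <= 1:
--         return "Funny"
--
--     # Calculate the absolute differences of adjacent characters in the original string
--     original_diff = [abs(ord(s[i]) - ord(s[i + 1])) for i in range(len(s) - 1)]
--
--     # Create the reversed string
--     reversed_s = s[::-1]
--
--     # Calculate the absolute differences of adjacent characters in the reversed string
--     reversed_diff = [abs(ord(reversed_s[i]) - ord(reversed_s[i + 1])) for i in range(len(reversed_s) - 1)]
--
--     # Check if the lists of differences are the same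
--     if original_diff == reversed_diff:
--         return "Funny"
--     else:
--         return "Not Funny"
-- ===== SOURCE B (Python) =====
-- def Funny(s):
--     # One diff array built in a single zip pass, then an in-place two-pointer
--     # palindrome scan with early exit; no reversed string, no second diff list.
--     d = [abs(ord(a) - ord(b)) for a, b in zip(s, s[1:])]
--     lo, hi = 0, len(d) - 1
--     while lo < hi:
--         if d[lo] != d[hi]:
--             return "Not Funny"
--         lo += 1
--         hi -= 1
--     return "Funny"
-- ===== Notes on version B (the rewrite author's own statement) =====
-- stated objective: simpler
-- what changed: B builds the adjacent-difference array once via zip and checks it is a palindrome with an inward two-pointer loop that exits early, instead of materialising the reversed string, computing a second index-based diff list and comparing the two lists.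
import Mathlib
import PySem

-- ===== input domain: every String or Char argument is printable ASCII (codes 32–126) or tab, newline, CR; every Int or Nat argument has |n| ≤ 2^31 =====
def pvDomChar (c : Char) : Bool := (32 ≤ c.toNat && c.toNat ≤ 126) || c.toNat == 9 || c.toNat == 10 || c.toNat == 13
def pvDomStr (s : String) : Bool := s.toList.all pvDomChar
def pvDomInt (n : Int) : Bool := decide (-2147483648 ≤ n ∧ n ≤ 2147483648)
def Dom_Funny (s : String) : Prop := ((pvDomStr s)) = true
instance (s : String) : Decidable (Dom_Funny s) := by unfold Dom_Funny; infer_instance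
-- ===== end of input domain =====

-- B builds the adjacent-difference array once (zip) and checks it is a palindrome with
-- an inward two-pointer early-exit loop, instead of A's reversed string + second diff list.


-- ===== PORT A =====
def Funny (s : String) : String :=
  if PySem.Str.len s ≤ 1 then "Funny"
  else
    let cs := s.toList
    let original_diff := (PySem.List.pyRange 0 (PySem.Str.len s - 1) 1).map
      (fun i => |((PySem.List.pyGetD cs i 'a').toNat : Int) -
                 ((PySem.List.pyGetD cs (i + 1) 'a').toNat : Int)|)
    -- s[::-1]: PySem.List.slice? with step -1 is always some here (step ≠ 0)
    let reversed_s := (PySem.List.slice? cs none none (-1)).getD []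
    let reversed_diff := (PySem.List.pyRange 0 ((reversed_s.length : Int) - 1) 1).map
      (fun i => |((PySem.List.pyGetD reversed_s i 'a').toNat : Int) -
                 ((PySem.List.pyGetD reversed_s (i + 1) 'a').toNat : Int)|)
    if original_diff = reversed_diff then "Funny" else "Not Funny"

-- ===== PORT B =====
-- the while loop of Source B: two pointers moving inward, early return on mismatch
def funnyLoop (d : List Int) (lo hi : Int) : String :=
  if _h : lo < hi then
    if PySem.List.pyGetD d lo 0 ≠ PySem.List.pyGetD d hi 0 then "Not Funny"
    else funnyLoop d (lo + 1) (hi - 1)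
  else "Funny"
termination_by (hi - lo).toNat
decreasing_by omega

def Funny_alt (s : String) : String :=
  let cs := s.toList
  let d := (cs.zip (PySem.List.slice cs (some 1) none)).map
    (fun p => |((p.1.toNat : Int)) - (p.2.toNat : Int)|)
  funnyLoop d 0 ((d.length : Int) - 1)

-- ===== PRECONDITION & SPEC =====
def Spec_Funny (s : String) (out : String) : Prop := out = Funny_alt s
instance (s : String) (out : String) : Decidable (Spec_Funny s out) := by unfold Spec_Funny; infer_instance

-- ===== CLAIM (what is proved, stated in full; the proofs are below) =====
def Claim_equal_Funny : Prop := ∀ (s : String), Dom_Funny s → Spec_Funny s (Funny s)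

-- ===== LEMMAS AND PROOFS =====

-- adjacent absolute differences of a character list
def diffsC : List Char → List Int
  | a :: b :: t => |((a.toNat : Int)) - (b.toNat : Int)| :: diffsC (b :: t)
  | _ => []

-- B's zip comprehension computes diffsC
theorem zip_diff (cs : List Char) :
    (cs.zip cs.tail).map (fun p => |((p.1.toNat : Int)) - (p.2.toNat : Int)|) = diffsC cs := by
  match cs with
  | [] => rfl
  | [a] => rfl
  | a :: b :: t => simp [diffsC, ← zip_diff (b :: t)]

-- A's index comprehension computes diffsC (stated over List.getD / List.range)
theorem range_diff (cs : List Char) :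
    (List.range (cs.length - 1)).map
      (fun k => |((cs.getD k 'a').toNat : Int) - ((cs.getD (k + 1) 'a').toNat : Int)|)
      = diffsC cs := by
  match cs with
  | [] => rfl
  | [a] => rfl
  | a :: b :: t =>
    have ih := range_diff (b :: t)
    simp only [List.length_cons, Nat.add_sub_cancel] at ih ⊢
    rw [List.range_succ_eq_map, List.map_cons, List.map_map]
    have hf : ((fun k => |((((a :: b :: t).getD k 'a').toNat : Int)) -
          (((a :: b :: t).getD (k + 1) 'a').toNat : Int)|) ∘ Nat.succ)
        = (fun k => |((((b :: t).getD k 'a').toNat : Int)) -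
          (((b :: t).getD (k + 1) 'a').toNat : Int)|) := by
      funext k
      simp [Function.comp, Nat.succ_eq_add_one]
    rw [hf, ih]
    simp [diffsC, List.getD]

-- append two trailing chars: the diff list gains one entry
theorem diffsC_append_two (xs : List Char) (y a : Char) :
    diffsC (xs ++ [y, a]) = diffsC (xs ++ [y]) ++ [|((y.toNat : Int)) - (a.toNat : Int)|] := by
  match xs with
  | [] => rfl
  | [x] => rfl
  | x :: b :: t =>
    have ih := diffsC_append_two (b :: t) y a
    simp only [List.cons_append, diffsC] at ih ⊢
    rw [ih]

-- diffs of the reversed string = reversed diffs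
theorem diffsC_reverse (cs : List Char) : diffsC cs.reverse = (diffsC cs).reverse := by
  match cs with
  | [] => rfl
  | [a] => rfl
  | a :: b :: t =>
    have ih := diffsC_reverse (b :: t)
    have h2 : (a :: b :: t).reverse = t.reverse ++ [b, a] := by simp
    rw [h2, diffsC_append_two]
    have h4 : t.reverse ++ [b] = (b :: t).reverse := by simp
    rw [h4, ih]
    simp [diffsC, abs_sub_comm]

-- characterisation of the two-pointer loop
theorem funnyLoop_eq_funny (d : List Int) (lo hi : Int) :
    funnyLoop d lo hi = "Funny" ↔
      (∀ k : Int, lo ≤ k → k ≤ hi →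
        PySem.List.pyGetD d k 0 = PySem.List.pyGetD d (lo + hi - k) 0) := by
  induction lo, hi using funnyLoop.induct d with
  | case1 lo hi hlt hne =>
    rw [funnyLoop, dif_pos hlt, if_pos hne]
    constructor
    · intro h; simp at h
    · intro h
      have h1 := h lo le_rfl (le_of_lt hlt)
      rw [show lo + hi - lo = hi by omega] at h1
      exact absurd h1 hne
  | case2 lo hi hlt hne ih =>
    have heq : PySem.List.pyGetD d lo 0 = PySem.List.pyGetD d hi 0 := not_not.mp hne
    rw [funnyLoop, dif_pos hlt, if_neg hne, ih]
    constructor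
    · intro h k hk1 hk2
      by_cases hklo : k = lo
      · subst hklo
        rw [show k + hi - k = hi by omega]
        exact heq
      · by_cases hkhi : k = hi
        · subst hkhi
          rw [show lo + k - k = lo by omega]
          exact heq.symm
        · have h1 := h k (by omega) (by omega)
          rwa [show lo + 1 + (hi - 1) - k = lo + hi - k by omega] at h1
    · intro h k hk1 hk2
      have h1 := h k (by omega) (by omega)
      rwa [show lo + hi - k = lo + 1 + (hi - 1) - k by omega] at h1
  | case3 lo hi hlt =>
    rw [funnyLoop, dif_neg hlt]
    constructor
    · intro _ k hk1 hk2
      congr 1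
      omega
    · intro _; rfl

-- the loop only ever returns "Funny" or "Not Funny"
theorem funnyLoop_values (d : List Int) (lo hi : Int) :
    funnyLoop d lo hi = "Funny" ∨ funnyLoop d lo hi = "Not Funny" := by
  induction lo, hi using funnyLoop.induct d with
  | case1 lo hi hlt hne => rw [funnyLoop]; simp [hlt, hne]
  | case2 lo hi hlt hne ih => rw [funnyLoop]; simpa [hlt, hne] using ih
  | case3 lo hi hlt => rw [funnyLoop]; simp [hlt]

-- palindromicity of d in the loop's index vocabulary
theorem pal_iff (d : List Int) :
    d = d.reverse ↔
      (∀ k : Int, 0 ≤ k → k ≤ (d.length : Int) - 1 →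
        PySem.List.pyGetD d k 0 = PySem.List.pyGetD d (0 + ((d.length : Int) - 1) - k) 0) := by
  constructor
  · intro h k hk0 hk1
    have hklen : k.toNat < d.length := by omega
    rw [PySem.List.pyGetD_eq_getElem d 0 hk0 (by omega),
        PySem.List.pyGetD_eq_getElem d 0 (by omega) (by omega)]
    calc d[k.toNat] = d.reverse[k.toNat]'(by simpa using hklen) := List.getElem_of_eq h _
      _ = d[d.length - 1 - k.toNat] := List.getElem_reverse _
      _ = d[(0 + ((d.length : Int) - 1) - k).toNat]'(by omega) := by congr 1; omega
  · intro h
    apply List.ext_getElem (by simp)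
    intro i h1 h2
    rw [List.getElem_reverse]
    have hh := h (i : Int) (by omega) (by omega)
    rw [PySem.List.pyGetD_eq_getElem d 0 (by omega) (by omega),
        PySem.List.pyGetD_eq_getElem d 0 (by omega) (by omega)] at hh
    convert hh using 2
    all_goals omega

-- A's list-equality test agrees with B's two-pointer loop on any diff array
theorem main_eq (d : List Int) :
    (if d = d.reverse then "Funny" else "Not Funny") = funnyLoop d 0 ((d.length : Int) - 1) := by
  split_ifs with hp
  · symm
    rw [funnyLoop_eq_funny]
    intro k hk1 hk2
    exact (pal_iff d).mp hp k hk1 hk2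
  · rcases funnyLoop_values d 0 ((d.length : Int) - 1) with h | h
    · exact absurd ((pal_iff d).mpr (by
        intro k hk1 hk2
        exact (funnyLoop_eq_funny _ _ _).mp h k hk1 hk2)) hp
    · rw [h]

-- A's comprehension, with the Int-cast range bound, computes diffsC
theorem A_diff (cs : List Char) (h : 1 ≤ cs.length) :
    (PySem.List.pyRange 0 ((cs.length : Int) - 1) 1).map
      (fun i => |((PySem.List.pyGetD cs i 'a').toNat : Int) -
                 ((PySem.List.pyGetD cs (i + 1) 'a').toNat : Int)|)
      = diffsC cs := by
  rw [show ((cs.length : Int) - 1) = ((cs.length - 1 : Nat) : Int) by omega,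
      PySem.List.pyRange_zero_natCast, List.map_map]
  have hf : ((fun i => |((PySem.List.pyGetD cs i 'a').toNat : Int) -
                 ((PySem.List.pyGetD cs (i + 1) 'a').toNat : Int)|) ∘ (fun k : Nat => (k : Int)))
      = (fun k : Nat => |((cs.getD k 'a').toNat : Int) - ((cs.getD (k + 1) 'a').toNat : Int)|) := by
    funext k
    simp only [Function.comp_apply, PySem.List.pyGetD_natCast,
      show ((k : Int) + 1) = ((k + 1 : Nat) : Int) by push_cast; ring]
  rw [hf, range_diff]

-- diffsC of a short list is empty
theorem diffsC_short (cs : List Char) (h : cs.length ≤ 1) : diffsC cs = [] := by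
  match cs with
  | [] => rfl
  | [a] => rfl

-- ===== VERDICT (by name: the statement is the Claim_ definition above) =====
theorem Funny_spec : Claim_equal_Funny := by
  unfold Claim_equal_Funny
  intro s _
  unfold Spec_Funny Funny Funny_alt
  simp only [PySem.Str.len_eq, PySem.List.slice_from_one, PySem.List.slice?_none_none_neg_one,
    Option.getD_some]
  rw [zip_diff, ← main_eq (diffsC s.toList)]
  by_cases h : (s.toList.length : Int) ≤ 1
  · rw [if_pos h, diffsC_short s.toList (by omega)]
    simp
  · rw [if_neg h, A_diff s.toList (by omega), A_diff s.toList.reverse (by rw [List.length_reverse]; omega),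
      diffsC_reverse]
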